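-- pv_equiv track=rewrite | github.com/Mminmint/LCSG-downstream | main.py | lineBound
-- ===== SOURCE A (Python) =====
-- def lineBound(readyLCDict):
--     LCBound = list()
--     LCBound.append(0)
--     readyLC = []
--
--     for i in range(3):
--         if i in readyLCDict.keys():
--             bound = LCBound[-1] + len(readyLCDict[i])
--             LCBound.append(bound)
--             readyLC.extend(readyLCDict[i])
--         else:
--             LCBound.append(LCBound[-1])
--
--     LCBound.pop(0)
--     return LCBound, readyLC
-- ===== SOURCE B (Python) =====
-- def lineBound(readyLCDict):
--     # Concatenate first, then derive the bounds BACK-TO-FRONT from the total: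
--     # walking i = 2, 1, 0, prepend the running total and subtract segment i's
--     # length, so no forward running sum and no sentinel is ever needed.
--     readyLC = readyLCDict.get(0, []) + readyLCDict.get(1, []) + readyLCDict.get(2, [])
--     bounds = []
--     total = len(readyLC)
--     for i in (2, 1, 0):
--         bounds.insert(0, total)
--         total -= len(readyLCDict.get(i, []))
--     return bounds, readyLC
-- ===== Notes on version B (the rewrite author's own statement) =====
-- stated objective: alternative
-- what changed: Instead of A's forward loop with a sentinel-0 running-total accumulator, B concatenates the three segments first and then derives the bounds back-to-front: it walks keys 2,1,0 prepending the running total and subtracting each segment's length, so the bounds are suffix-differences of the total rather than forward prefix sums.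
import Mathlib
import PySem

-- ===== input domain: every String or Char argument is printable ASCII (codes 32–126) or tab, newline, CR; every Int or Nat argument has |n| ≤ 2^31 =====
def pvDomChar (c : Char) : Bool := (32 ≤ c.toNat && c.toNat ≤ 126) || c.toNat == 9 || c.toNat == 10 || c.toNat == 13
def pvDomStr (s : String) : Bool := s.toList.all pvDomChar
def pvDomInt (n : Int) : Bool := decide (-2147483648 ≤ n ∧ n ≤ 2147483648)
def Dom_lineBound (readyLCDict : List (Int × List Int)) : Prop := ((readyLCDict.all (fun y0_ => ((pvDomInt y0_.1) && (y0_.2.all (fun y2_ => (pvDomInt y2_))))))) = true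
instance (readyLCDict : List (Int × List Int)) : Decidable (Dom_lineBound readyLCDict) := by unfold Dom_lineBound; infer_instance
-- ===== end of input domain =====

-- B concatenates the segments first and then builds the bounds back-to-front by
-- subtracting segment lengths from the total (objective: alternative; same cost).

-- ===== PORT A =====
-- single forward loop over range(3) carrying (LCBound, readyLC); LCBound starts as [0]
-- and is never empty, so the `.getD 0` on LCBound[-1] is never taken
def lineBound (readyLCDict : List (Int × List Int)) : List Int × List Int :=
  let dd := PySem.Dict.mk readyLCDict
  let st := (PySem.List.pyRange 0 3 1).foldl
    (fun (st : List Int × List Int) i =>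
      if dd.contains i then
        let bound := (PySem.List.pyGet? st.1 (-1)).getD 0 + ((dd.getD i []).length : Int)
        (st.1 ++ [bound], st.2 ++ dd.getD i [])
      else
        (st.1 ++ [(PySem.List.pyGet? st.1 (-1)).getD 0], st.2))
    (([0] : List Int), ([] : List Int))
  (st.1.drop 1, st.2)

-- ===== PORT B =====
def lineBound_alt (readyLCDict : List (Int × List Int)) : List Int × List Int :=
  let dd := PySem.Dict.mk readyLCDict
  let readyLC : List Int := dd.getD 0 [] ++ dd.getD 1 [] ++ dd.getD 2 []
  -- loop over (2, 1, 0), prepending the running total and subtracting segment i's length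
  let st := ([2, 1, 0] : List Int).foldl
    (fun (st : List Int × Int) i =>
      (st.2 :: st.1, st.2 - ((dd.getD i []).length : Int)))
    (([] : List Int), (readyLC.length : Int))
  (st.1, readyLC)

-- ===== PRECONDITION & SPEC =====
def Spec_lineBound (readyLCDict : List (Int × List Int)) (out : List Int × List Int) : Prop := out = lineBound_alt readyLCDict
instance (readyLCDict : List (Int × List Int)) (out : List Int × List Int) : Decidable (Spec_lineBound readyLCDict out) := by unfold Spec_lineBound; infer_instance

-- ===== CLAIM (what is proved, stated in full; the proofs are below) =====
def Claim_equal_lineBound : Prop := ∀ (readyLCDict : List (Int × List Int)), Dom_lineBound readyLCDict → Spec_lineBound readyLCDict (lineBound readyLCDict)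

-- ===== LEMMAS AND PROOFS =====

-- ===== VERDICT (by name: the statement is the Claim_ definition above) =====
theorem lineBound_spec : Claim_equal_lineBound := by
  intro d _
  unfold Spec_lineBound lineBound lineBound_alt
  set dd := PySem.Dict.mk d
  by_cases h0 : dd.contains 0 <;> by_cases h1 : dd.contains 1 <;> by_cases h2 : dd.contains 2 <;>
    simp [PySem.List.pyRange, PySem.List.pyGet?, PySem.List.pyIdx?, List.range_succ, h0, h1, h2,
          PySem.Dict.getD_of_not_contains] <;> ring_nf <;> simp
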